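-- pv_equiv track=rewrite | github.com/JerryX1110/IROS22-FMG-Sensor-Optimization | utils.py | select_channel
-- ===== SOURCE A (Python) =====
-- def select_channel(n,items):
--     N = len(items)
--     set_all=[]
--     for i in range(2**N):
--         combo = []
--         for j in range(N):
--             if(i >> j ) % 2 == 1:
--                 combo.append(items[j])
--         if len(combo) == n:
--             set_all.append(combo)
--     return set_all
-- ===== SOURCE B (Python) =====
-- def select_channel(n, items):
--     # Pascal-style recursion: n-subsets of items in increasing bitmask order are
--     # the n-subsets avoiding the last item, then the (n-1)-subsets each extended by it.
--     if n < 0 or n > len(items):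
--         return []
--     if n == 0:
--         return [[]]
--     head = items[:-1]
--     x = items[-1]
--     return select_channel(n, head) + [c + [x] for c in select_channel(n - 1, head)]
-- ===== Notes on version B (the rewrite author's own statement) =====
-- stated objective: alternative
-- what changed: A scans all 2^N bitmasks and decodes each into a subset; B builds exactly the n-subsets by Pascal-style recursion on the last item (subsets without it, then subsets without it extended by it), which yields the same increasing-bitmask order without enumerating masks; not claimed faster since at the largest timed sizes the output itself dominates.
import Mathlib
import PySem

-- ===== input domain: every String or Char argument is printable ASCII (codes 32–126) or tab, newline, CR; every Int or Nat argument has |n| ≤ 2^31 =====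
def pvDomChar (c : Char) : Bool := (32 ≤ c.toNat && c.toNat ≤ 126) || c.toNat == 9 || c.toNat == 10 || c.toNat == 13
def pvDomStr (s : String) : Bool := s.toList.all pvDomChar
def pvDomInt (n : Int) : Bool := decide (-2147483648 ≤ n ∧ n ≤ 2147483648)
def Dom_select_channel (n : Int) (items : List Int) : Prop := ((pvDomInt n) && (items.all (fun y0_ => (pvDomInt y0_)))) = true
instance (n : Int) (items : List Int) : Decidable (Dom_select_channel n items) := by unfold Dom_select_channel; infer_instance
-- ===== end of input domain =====

-- B replaces A's scan of all 2^N bitmasks by a Pascal-style recursion on the last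
-- item that builds exactly the n-subsets, in the same order; objective: alternative.

-- ===== PORT A =====
-- A's inner loop (decode the set bits of mask i into a combo), kept as a helper.
def select_channel_combo (items : List Int) (i : Int) : List Int :=
  (PySem.List.pyRange 0 (items.length : Int) 1).foldl (fun combo j =>
    -- (i >> j) % 2 == 1 ;  j ranges over 0..len-1, so j.toNat is exact
    if PySem.Int.mod (i >>> j.toNat) 2 == 1 then
      combo ++ [PySem.List.pyGetD items j 0]   -- items[j], 0 ≤ j < len: never raises
    else combo) []

-- A: for i in range(2**N): decode mask i, keep the combos of length n.
def select_channel (n : Int) (items : List Int) : List (List Int) :=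
  (PySem.List.pyRange 0 ((2 : Int) ^ items.length) 1).foldl (fun set_all i =>
    let combo := select_channel_combo items i
    if (combo.length : Int) == n then set_all ++ [combo] else set_all) []

-- ===== PORT B =====
-- Source B: recursion on the last item; items[:-1] = dropLast, items[-1] via pyGetD (list nonempty there).
def select_channel_alt (n : Int) (items : List Int) : List (List Int) :=
  if n < 0 ∨ (items.length : Int) < n then []
  else if n = 0 then [[]]
  else
    let head := items.dropLast
    let x := PySem.List.pyGetD items (-1) 0
    select_channel_alt n head ++ (select_channel_alt (n - 1) head).map (fun c => c ++ [x])
termination_by items.length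
decreasing_by
  all_goals simp only [List.length_dropLast]; omega

-- ===== PRECONDITION & SPEC =====
def Spec_select_channel (n : Int) (items : List Int) (out : List (List Int)) : Prop := out = select_channel_alt n items
instance (n : Int) (items : List Int) (out : List (List Int)) : Decidable (Spec_select_channel n items out) := by unfold Spec_select_channel; infer_instance

-- ===== CLAIM (what is proved, stated in full; the proofs are below) =====
def Claim_equal_select_channel : Prop := ∀ (n : Int) (items : List Int), Dom_select_channel n items → Spec_select_channel n items (select_channel n items)

-- ===== LEMMAS AND PROOFS =====

-- bit j of mask i, as A's test computes it
def pvBit (i : Int) (j : Nat) : Bool := PySem.Int.mod (i >>> (j : Int)) 2 == 1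

-- the combo A decodes from mask i, in filter/map form
def pvCombo (items : List Int) (i : Int) : List Int :=
  ((List.range items.length).filter (fun j => pvBit i j)).map (fun j => items.getD j 0)

-- A's whole result, in filter/map form
def pvAS (n : Int) (items : List Int) : List (List Int) :=
  ((List.range (2 ^ items.length)).filter
      (fun i : Nat => ((pvCombo items (i : Int)).length : Int) == n)).map
    (fun i : Nat => pvCombo items (i : Int))

theorem pvShift_cast (a b : Nat) : ((a : Int) >>> (b : Int)) = ((a >>> b : Nat) : Int) := by
  simp [Int.shiftRight_eq]

theorem pvMod2_cast (m : Nat) : PySem.Int.mod ((m : Int)) 2 = ((m % 2 : Nat) : Int) := by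
  simp only [PySem.Int.mod]
  rw [Int.fmod_eq_emod]
  simp

theorem pvBit_natCast (i j : Nat) : pvBit (i : Int) j = ((i >>> j) % 2 == 1) := by
  rw [pvBit, pvShift_cast, pvMod2_cast]
  rcases Nat.mod_two_eq_zero_or_one (i >>> j) with h | h <;> simp [h]

theorem pvBit_high (i N : Nat) (h : i < 2 ^ N) : pvBit (i : Int) N = false := by
  rw [pvBit_natCast]
  simp [Nat.shiftRight_eq_div_pow, Nat.div_eq_of_lt h]

theorem pvBit_high_set (i N : Nat) (h : i < 2 ^ N) : pvBit ((2 : Int) ^ N + (i : Int)) N = true := by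
  rw [show (2 : Int) ^ N + (i : Int) = ((2 ^ N + i : Nat) : Int) by push_cast; rfl]
  have h1 : (2 ^ N + i) / 2 ^ N = 1 := by
    rw [Nat.add_div_left _ (by positivity), Nat.div_eq_of_lt h]
  rw [pvBit_natCast]
  simp [Nat.shiftRight_eq_div_pow, h1]

theorem pvBit_low (i N j : Nat) (h : j < N) :
    pvBit ((2 : Int) ^ N + (i : Int)) j = pvBit (i : Int) j := by
  rw [show (2 : Int) ^ N + (i : Int) = ((2 ^ N + i : Nat) : Int) by push_cast; rfl]
  have hd : (2 ^ N + i) / 2 ^ j = 2 ^ (N - j) + i / 2 ^ j := by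
    have h2 : 2 ^ N = 2 ^ (N - j) * 2 ^ j := by
      rw [← pow_add]; congr 1; omega
    rw [h2, Nat.add_comm, Nat.add_mul_div_right _ _ (by positivity)]
    omega
  have he : 2 ^ (N - j) % 2 = 0 := by
    have h3 : N - j = (N - j - 1) + 1 := by omega
    rw [h3, pow_succ]; omega
  rw [pvBit_natCast, pvBit_natCast]
  simp only [Nat.shiftRight_eq_div_pow, hd]
  congr 1
  omega

theorem pvCombo_eq (items : List Int) (i : Int) :
    select_channel_combo items i = pvCombo items i := by
  rw [select_channel_combo, PySem.List.pyRange_zero_natCast, List.foldl_map]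
  simp only [Int.toNat_natCast, PySem.List.pyGetD_natCast]
  rw [PySem.List.foldl_append_if (p := fun j : Nat => PySem.Int.mod (i >>> (j : Int)) 2 == 1)
        (f := fun j : Nat => items.getD j 0)]
  simp [pvCombo, pvBit]

theorem pvA_eq_AS (n : Int) (items : List Int) : select_channel n items = pvAS n items := by
  unfold select_channel
  simp only [pvCombo_eq]
  rw [show ((2 : Int) ^ items.length) = ((2 ^ items.length : Nat) : Int) by push_cast; rfl]
  rw [PySem.List.pyRange_zero_natCast, List.foldl_map]
  rw [PySem.List.foldl_append_if (p := fun i : Nat => ((pvCombo items (i : Int)).length : Int) == n)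
        (f := fun i : Nat => pvCombo items (i : Int))]
  simp only [pvAS, List.nil_append]

theorem pvCombo_append_lt (items : List Int) (x : Int) (i : Nat) (h : i < 2 ^ items.length) :
    pvCombo (items ++ [x]) (i : Int) = pvCombo items (i : Int) := by
  unfold pvCombo
  simp only [List.length_append, List.length_cons, List.length_nil, Nat.zero_add]
  rw [List.range_succ, List.filter_append, List.map_append]
  rw [show List.filter (fun j => pvBit (i : Int) j) [items.length] = [] by
    simp [List.filter, pvBit_high i items.length h]]
  simp only [List.map_nil, List.append_nil]
  exact List.map_congr_left (fun j hj => by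
    have hjN : j < items.length := List.mem_range.mp (List.mem_filter.mp hj).1
    exact List.getD_append _ _ _ _ hjN)

theorem pvCombo_append_ge (items : List Int) (x : Int) (i : Nat) (h : i < 2 ^ items.length) :
    pvCombo (items ++ [x]) ((2 : Int) ^ items.length + (i : Int))
      = pvCombo items (i : Int) ++ [x] := by
  unfold pvCombo
  simp only [List.length_append, List.length_cons, List.length_nil, Nat.zero_add]
  rw [List.range_succ, List.filter_append, List.map_append]
  congr 1
  · rw [List.filter_congr (fun j hj => by
      rw [pvBit_low i items.length j (List.mem_range.mp hj)])]
    exact List.map_congr_left (fun j hj => by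
      have hjN : j < items.length := List.mem_range.mp (List.mem_filter.mp hj).1
      exact List.getD_append _ _ _ _ hjN)
  · rw [show List.filter (fun j => pvBit ((2 : Int) ^ items.length + (i : Int)) j) [items.length]
        = [items.length] by simp [pvBit_high_set i items.length h]]
    simp [List.getD_eq_getElem?_getD]

theorem pvAS_nil (n : Int) : pvAS n [] = if (0 : Int) = n then [[]] else [] := by
  unfold pvAS pvCombo
  by_cases h : (0 : Int) = n
  · simp [List.range_one, List.range_zero, ← h]
  · simp [List.range_one, List.range_zero, h]

theorem pvPred_high (n : Int) (items : List Int) (x : Int) (i : Nat)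
    (h : i < 2 ^ items.length) :
    (((pvCombo (items ++ [x]) ((2 ^ items.length + i : Nat) : Int)).length : Int) == n)
      = (((pvCombo items (i : Int)).length : Int) == n - 1) := by
  rw [show ((2 ^ items.length + i : Nat) : Int) = (2 : Int) ^ items.length + (i : Int) by
        push_cast; rfl,
      pvCombo_append_ge items x i h]
  simp only [List.length_append, List.length_cons, List.length_nil, Nat.zero_add]
  rw [Bool.eq_iff_iff]
  simp only [beq_iff_eq]
  push_cast
  omega

theorem pvAS_step (n : Int) (items : List Int) (x : Int) :
    pvAS n (items ++ [x]) = pvAS n items ++ (pvAS (n - 1) items).map (fun c => c ++ [x]) := by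
  unfold pvAS
  simp only [List.length_append, List.length_cons, List.length_nil, Nat.zero_add]
  rw [show 2 ^ (items.length + 1) = 2 ^ items.length + 2 ^ items.length by ring]
  rw [List.range_add, List.filter_append, List.map_append]
  congr 1
  · rw [List.filter_congr (fun i hi => by
      rw [pvCombo_append_lt items x i (List.mem_range.mp hi)])]
    exact List.map_congr_left (fun i hi => by
      have hm := List.mem_range.mp (List.mem_filter.mp hi).1
      exact pvCombo_append_lt items x i hm)
  · rw [List.filter_map, List.map_map]
    simp only [Function.comp_def]
    rw [List.filter_congr (fun i hi => pvPred_high n items x i (List.mem_range.mp hi))]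
    rw [List.map_map]
    apply List.map_congr_left
    intro i hi
    have hm := List.mem_range.mp (List.mem_filter.mp hi).1
    show pvCombo (items ++ [x]) ((2 ^ items.length + i : Nat) : Int)
        = pvCombo items (i : Int) ++ [x]
    rw [show ((2 ^ items.length + i : Nat) : Int) = (2 : Int) ^ items.length + (i : Int) by
          push_cast; rfl]
    exact pvCombo_append_ge items x i hm

theorem pvB_neg (n : Int) (items : List Int) (h : n < 0) : select_channel_alt n items = [] := by
  unfold select_channel_alt; rw [if_pos (Or.inl h)]

theorem pvB_zero (items : List Int) : select_channel_alt 0 items = [[]] := by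
  unfold select_channel_alt
  rw [if_neg (by omega), if_pos rfl]

theorem pvB_gt (n : Int) (items : List Int) (h : (items.length : Int) < n) :
    select_channel_alt n items = [] := by
  unfold select_channel_alt; rw [if_pos (Or.inr h)]

theorem pvB_step (n : Int) (items : List Int) (x : Int) (h1 : 1 ≤ n)
    (h2 : n ≤ (items.length : Int) + 1) :
    select_channel_alt n (items ++ [x]) =
      select_channel_alt n items ++ (select_channel_alt (n - 1) items).map (fun c => c ++ [x]) := by
  conv_lhs => rw [select_channel_alt]
  rw [if_neg (by simp only [List.length_append, List.length_cons, List.length_nil]; push_cast; omega),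
      if_neg (by omega)]
  simp only [List.dropLast_concat, PySem.List.pyGetD_neg_one_append_singleton]

theorem pvMain (items : List Int) : ∀ n : Int, select_channel n items = select_channel_alt n items := by
  induction items using List.reverseRecOn with
  | nil =>
    intro n
    rw [pvA_eq_AS, pvAS_nil]
    by_cases h : (0 : Int) = n
    · subst h; rw [if_pos rfl, pvB_zero]
    · rw [if_neg h]
      rcases lt_or_gt_of_ne h with hl | hg
      · rw [pvB_gt n [] (by simpa using hl)]
      · rw [pvB_neg n [] (by omega)]
  | append_singleton items x ih =>
    intro n
    rw [pvA_eq_AS, pvAS_step, ← pvA_eq_AS, ← pvA_eq_AS, ih, ih]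
    by_cases h0 : n < 0
    · rw [pvB_neg n _ h0, pvB_neg n _ h0, pvB_neg (n - 1) _ (by omega)]; simp
    by_cases hz : n = 0
    · subst hz
      rw [pvB_zero, pvB_zero, pvB_neg (0 - 1) _ (by omega)]; simp
    by_cases hgt : (items.length : Int) + 1 < n
    · rw [pvB_gt n (items ++ [x]) (by simp only [List.length_append, List.length_cons, List.length_nil]; push_cast; omega),
          pvB_gt n items (by omega), pvB_gt (n - 1) items (by omega)]
      simp
    · exact (pvB_step n items x (by omega) (by omega)).symm

-- ===== VERDICT (by name: the statement is the Claim_ definition above) =====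
theorem select_channel_spec : Claim_equal_select_channel := by
  intro n items _
  unfold Spec_select_channel
  exact pvMain items n
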